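-- pv_equiv track=rewrite | github.com/mhosseinkaka/quera-kelaasor | quera2/travel.py | lost
-- ===== SOURCE A (Python) =====
-- def lost(list_people):
--     if len(list_people) == list_people[-1]:
--         result = len(list_people) + 1
--     else:
--         for i in range(len(list_people)):
--             if int(list_people[i]) - i > 1:
--                 result = list_people[i] - 1
--                 break
--     return result
-- ===== SOURCE B (Python) =====
-- def lost(list_people):
--     n = len(list_people)
--     if list_people[-1] == n:
--         return n + 1
--     return _gap(list_people, 0, n) - 1
--
--
-- def _gap(a, lo, hi):
--     """Value at the leftmost index j in [lo, hi) with a[j] - j > 1, else None."""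
--     if lo >= hi:
--         return None
--     if hi - lo == 1:
--         return a[lo] if a[lo] - lo > 1 else None
--     mid = (lo + hi) // 2
--     left = _gap(a, lo, mid)
--     return left if left is not None else _gap(a, mid, hi)
-- ===== Notes on version B (the rewrite author's own statement) =====
-- stated objective: alternative
-- what changed: B replaces A's forward index loop with break by a divide-and-conquer recursion that halves the index interval and short-circuits on the left half's result; Pre_ excludes only the inputs on which both programs raise (empty list, or no branch ever assigns result).
-- outside the precondition, e.g. on lost([-1]): A raises UnboundLocalError, B raises TypeError; on lost([]): A raises IndexError, B raises IndexError
import Mathlib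
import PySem

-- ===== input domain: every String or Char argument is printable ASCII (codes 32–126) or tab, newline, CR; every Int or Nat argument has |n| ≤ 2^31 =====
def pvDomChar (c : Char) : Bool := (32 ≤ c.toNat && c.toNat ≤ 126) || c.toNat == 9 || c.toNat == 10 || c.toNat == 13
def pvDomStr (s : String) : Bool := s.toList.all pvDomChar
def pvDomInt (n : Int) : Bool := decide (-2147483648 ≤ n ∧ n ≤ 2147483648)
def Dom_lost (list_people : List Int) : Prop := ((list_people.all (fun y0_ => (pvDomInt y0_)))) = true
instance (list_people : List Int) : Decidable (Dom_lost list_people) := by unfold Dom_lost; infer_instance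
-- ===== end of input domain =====

-- B replaces A's forward scan-with-break by a divide-and-conquer recursion on the index
-- interval (left half first, short-circuiting): an alternative decomposition, same O(n).

-- ===== PORT A =====
-- the for-loop with break: walks the range list left to right, stops at the first hit;
-- 'none' from pyGet? (IndexError) or loop exhaustion (UnboundLocalError) is excluded by Pre_
def lostLoopA (xs : List Int) : List Int → Option Int
  | [] => none
  | i :: rest =>
    match PySem.List.pyGet? xs i with
    | none => none
    | some v => if 1 < v - i then some (v - 1) else lostLoopA xs rest

def lost (list_people : List Int) : Int :=
  match PySem.List.pyGet? list_people (-1) with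
  | none => 0  -- Python raises IndexError here; excluded by Pre_lost
  | some last =>
    if (list_people.length : Int) = last then (list_people.length : Int) + 1
    else (lostLoopA list_people (PySem.List.pyRange 0 (list_people.length : Int) 1)).getD 0
    -- .getD 0: 'none' means Python's UnboundLocalError; excluded by Pre_lost

-- ===== PORT B =====
-- Source B's _gap: value at the leftmost index j in [lo, hi) with a[j] - j > 1, else None,
-- by halving the interval; pyGet? none (IndexError) folded to none, unreachable for
-- 0 ≤ lo < hi ≤ len a, the only calls Source B makes
def gapFind (xs : List Int) (lo hi : Int) : Option Int :=
  if _h1 : hi ≤ lo then none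
  else if _h2 : hi - lo = 1 then
    match PySem.List.pyGet? xs lo with
    | none => none
    | some v => if 1 < v - lo then some v else none
  else
    match gapFind xs lo (PySem.Int.floordiv (lo + hi) 2) with
    | some v => some v
    | none => gapFind xs (PySem.Int.floordiv (lo + hi) 2) hi
termination_by (hi - lo).toNat
decreasing_by
  · rw [PySem.Int.floordiv_eq_ediv_of_pos (by omega)]; omega
  · rw [PySem.Int.floordiv_eq_ediv_of_pos (by omega)]; omega

def lost_alt (list_people : List Int) : Int :=
  let n : Int := list_people.length
  match PySem.List.pyGet? list_people (-1) with
  | none => 0  -- Python raises IndexError here; excluded by Pre_lost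
  | some last =>
    if last = n then n + 1
    else match gapFind list_people 0 n with
         | some v => v - 1
         | none => 0  -- Python raises TypeError (None - 1) here; excluded by Pre_lost

-- ===== PRECONDITION & SPEC =====
-- Pre_ excludes exactly the inputs where Python A raises: the empty list (IndexError on
-- list_people[-1]) and lists with neither last == len nor any index i with xs[i]-i > 1
-- (UnboundLocalError: 'result' never assigned); B raises on those inputs too.
def Pre_lost (list_people : List Int) : Prop :=
  list_people ≠ [] ∧
    (PySem.List.pyGet? list_people (-1) = some (list_people.length : Int) ∨
      ∃ i ∈ List.range list_people.length, 1 < list_people.getD i 0 - (i : Int))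
instance (list_people : List Int) : Decidable (Pre_lost list_people) := by
  unfold Pre_lost; infer_instance
def pvWitness_lost : List Int := [1, 2, 4]

def Spec_lost (list_people : List Int) (out : Int) : Prop := out = lost_alt list_people
instance (list_people : List Int) (out : Int) : Decidable (Spec_lost list_people out) := by unfold Spec_lost; infer_instance

-- ===== CLAIM (what is proved, stated in full; the proofs are below) =====
def Claim_equal_lost : Prop := ∀ (list_people : List Int), Dom_lost list_people → Pre_lost list_people → Spec_lost list_people (lost list_people)

-- ===== LEMMAS AND PROOFS =====

-- A's scan over a concatenation of index lists, when every index of the first part is in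
-- range (so 'none' there can only mean exhaustion), short-circuits like Option.orElse
lemma lostLoopA_append (xs l1 l2 : List Int)
    (h : ∀ i ∈ l1, PySem.List.pyGet? xs i ≠ none) :
    lostLoopA xs (l1 ++ l2) =
      (match lostLoopA xs l1 with | some v => some v | none => lostLoopA xs l2) := by
  induction l1 with
  | nil => rfl
  | cons i rest ih =>
    have hi : PySem.List.pyGet? xs i ≠ none := h i (by simp)
    simp only [List.cons_append, lostLoopA]
    cases hv : PySem.List.pyGet? xs i with
    | none => exact absurd hv hi
    | some v =>
      by_cases hc : 1 < v - i
      · simp [hc]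
      · simpa [hc] using ih (fun j hj => h j (by simp [hj]))

-- the heart of the equivalence: B's divide-and-conquer over [lo, hi) finds the same first
-- hit as A's left-to-right scan over range(lo, hi) (B keeps the value, A keeps value - 1)
lemma gapFind_eq_loopA (xs : List Int) (lo hi : Int)
    (hlo : 0 ≤ lo) (hhi : hi ≤ (xs.length : Int)) :
    lostLoopA xs (PySem.List.pyRange lo hi 1) = (gapFind xs lo hi).map (· - 1) := by
  by_cases h1 : hi ≤ lo
  · rw [gapFind, dif_pos h1, PySem.List.pyRange_one_eq_nil h1]; rfl
  · by_cases h2 : hi - lo = 1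
    · have hhl : hi = lo + 1 := by omega
      have hin : PySem.Raise.InRange xs.length lo := by
        simp only [PySem.Raise.InRange]; omega
      rw [gapFind, dif_neg h1, dif_pos h2, hhl, PySem.List.pyRange_one_singleton]
      simp only [lostLoopA]
      cases hv : PySem.List.pyGet? xs lo with
      | none => exact absurd ((PySem.List.pyGet?_eq_none_iff xs lo).mp hv) (by simpa using hin)
      | some v => by_cases hc : 1 < v - lo <;> simp [hc]
    · have hmid : PySem.Int.floordiv (lo + hi) 2 = (lo + hi) / 2 :=
        PySem.Int.floordiv_eq_ediv_of_pos (by omega)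
      have hb : lo < (lo + hi) / 2 ∧ (lo + hi) / 2 < hi := by omega
      rw [gapFind, dif_neg h1, dif_neg h2, hmid,
        PySem.List.pyRange_one_append lo ((lo + hi) / 2) hi (by omega) (by omega),
        lostLoopA_append xs _ _ (by
          intro i hi'
          rw [PySem.List.mem_pyRange_one] at hi'
          rw [Ne, PySem.List.pyGet?_eq_none_iff]
          simp only [PySem.Raise.InRange]
          omega),
        gapFind_eq_loopA xs lo ((lo + hi) / 2) hlo (by omega),
        gapFind_eq_loopA xs ((lo + hi) / 2) hi (by omega) hhi]
      cases gapFind xs lo ((lo + hi) / 2) <;> simp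
termination_by (hi - lo).toNat
decreasing_by all_goals omega

lemma lost_eq_alt (xs : List Int) : lost xs = lost_alt xs := by
  unfold lost lost_alt
  cases hl : PySem.List.pyGet? xs (-1) with
  | none => rfl
  | some last =>
    simp only []
    by_cases he : (xs.length : Int) = last
    · simp [he]
    · rw [if_neg he, if_neg (fun h => he h.symm),
        gapFind_eq_loopA xs 0 (xs.length : Int) le_rfl le_rfl]
      cases gapFind xs 0 (xs.length : Int) <;> rfl

-- ===== VERDICT (by name: the statement is the Claim_ definition above) =====
theorem lost_spec : Claim_equal_lost := by
  intro xs _ _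
  exact lost_eq_alt xs
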